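-- pv_equiv track=rewrite | github.com/Liamdoult/aoc-2020 | 14/solution_2.py | part2
-- ===== SOURCE A (Python) =====
-- from dataclasses import dataclass
-- from functools import reduce
--
-- @dataclass
-- class Mask:
--     off: int
--     on: int
--
-- @dataclass
-- class Write:
--     addr: int
--     value: int
--
-- def parse(line):
--     if line.startswith('mask = '):
--         mask = line[7:]
--         return Mask(off=int(mask.replace('X', '0'), base=2),
--                     on=int(mask.replace('X', '1'), base=2))
--     if line.startswith('mem['):
--         i = line.index('] = ')
--         return Write(addr=int(line[4:i]), value=int(line[i + 4:]))
--
-- def part2(lines):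
--     mem = {}
--     for line in lines:
--         instruction = parse(line)
--         if isinstance(instruction, Mask):
--             maskoff, maskon = instruction.off, instruction.on
--         elif isinstance(instruction, Write):
--             diff = maskoff ^ maskon
--             popcount = bin(diff).count('1')
--             for i in range(1 << popcount):
--
--                 def f(acc, j):
--                     x, k = acc
--                     return (x ^ diff & (k ^ k - (i >> j & 1)), k & k - 1)
--
--                 mem[reduce(
--                     f, range(popcount),
--                     (instruction.addr | maskoff, diff))[0]] = instruction.value
--     return sum(mem.values())
-- ===== SOURCE B (Python) =====
-- def part2(lines):
--     # Same masked-write semantics; addresses are generated by doubling a list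
--     # over the floating bits (keep / flip each bit) instead of indexing 2^k
--     # combinations with a per-address reduce.
--     mem = {}
--     mask0 = mask1 = 0
--     for line in lines:
--         if line.startswith('mask = '):
--             m = line[7:]
--             mask0 = int(m.replace('X', '0'), 2)
--             mask1 = int(m.replace('X', '1'), 2)
--         elif line.startswith('mem['):
--             i = line.index('] = ')
--             value = int(line[i + 4:])
--             floating = mask0 ^ mask1
--             addrs = [int(line[4:i]) | mask0]
--             b = floating
--             while b:
--                 rest = b & (b - 1)
--                 low = b ^ rest
--                 addrs += [a ^ low for a in addrs]
--                 b = rest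
--             for a in addrs:
--                 mem[a] = value
--     return sum(mem.values())
-- ===== Notes on version B (the rewrite author's own statement) =====
-- stated objective: alternative
-- what changed: B generates each write's floating addresses by doubling an address list once per floating bit (keep/flip the bit), replacing A's enumeration of all 2^k bit-selector indices with a per-address functools.reduce over the mask's k bits, and parses lines inline instead of through dataclass instances.
-- outside the precondition, e.g. on part2(['mask = -XX', 'mem[0] = 5']): A returns 20, B does not finish within the time limit
import Mathlib
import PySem

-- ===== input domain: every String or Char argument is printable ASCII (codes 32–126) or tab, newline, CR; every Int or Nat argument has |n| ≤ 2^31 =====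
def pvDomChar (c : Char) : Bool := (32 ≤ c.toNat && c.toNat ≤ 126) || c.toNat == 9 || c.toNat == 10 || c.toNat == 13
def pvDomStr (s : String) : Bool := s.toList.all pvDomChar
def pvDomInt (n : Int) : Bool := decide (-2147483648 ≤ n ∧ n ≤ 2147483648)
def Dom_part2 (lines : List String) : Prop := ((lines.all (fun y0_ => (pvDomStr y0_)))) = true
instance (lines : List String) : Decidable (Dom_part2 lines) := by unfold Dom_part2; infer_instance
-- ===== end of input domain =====

-- B replaces A's per-write enumeration of 2^k bit-selector indices (each decoded by a
-- functools.reduce over the mask's floating bits) with doubling a list of addresses once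
-- per floating bit (keep/flip); objective: alternative (a different exact algorithm).

-- ===== PORT A =====

inductive InstrA : Type
  | mask (off on : Int) : InstrA
  | write (addr value : Int) : InstrA

-- parse(line): int(s, 2) / int(s) are PySem.Int.ofCharsBase? / ofChars? (exact); a parse
-- failure raises in Python (excluded by Pre_), the port substitutes 0 there (.getD 0).
def parseA (line : String) : Option InstrA :=
  if PySem.Str.startswith line "mask = " then
    some (.mask ((PySem.Int.ofCharsBase? (PySem.Chars.replace (PySem.List.slice line.toList (some 7) none) "X".toList "0".toList) 2).getD 0)
                ((PySem.Int.ofCharsBase? (PySem.Chars.replace (PySem.List.slice line.toList (some 7) none) "X".toList "1".toList) 2).getD 0))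
  else if PySem.Str.startswith line "mem[" then
    -- line.index('] = ') raises when absent (excluded by Pre_); find is -1 there
    some (.write ((PySem.Int.ofChars? (PySem.List.slice line.toList (some 4) (some (PySem.Str.find line "] = ")))).getD 0)
                 ((PySem.Int.ofChars? (PySem.List.slice line.toList (some (PySem.Str.find line "] = " + 4)) none)).getD 0))
  else none

-- the inner 'def f(acc, j)' of A
def fA (diff i : Int) (acc : Int × Int) (j : Int) : Int × Int :=
  (PySem.Int.bxor acc.1 (PySem.Int.band diff (PySem.Int.bxor acc.2 (acc.2 - PySem.Int.band (i >>> j.toNat) 1))),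
   PySem.Int.band acc.2 (acc.2 - 1))

-- the Write branch: bin(diff).count('1') is diff.bit_count() = PySem.Int.bitCount (exact for every Int)
def writeA (mem : PySem.Dict Int Int) (maskoff maskon addr value : Int) : PySem.Dict Int Int :=
  let diff := PySem.Int.bxor maskoff maskon
  let popcount := PySem.Int.bitCount diff
  (PySem.List.pyRange 0 ((1 : Int) <<< popcount)).foldl
    (fun mem i =>
      mem.insert ((PySem.List.pyRange 0 (popcount : Int)).foldl (fA diff i) (PySem.Int.bor addr maskoff, diff)).1
        value)
    mem

-- one line of A's loop; maskoff/maskon start as 0 (Python leaves them unbound: a Write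
-- before any Mask raises UnboundLocalError and is excluded by Pre_)
def stepA (st : PySem.Dict Int Int × Int × Int) (line : String) : PySem.Dict Int Int × Int × Int :=
  match parseA line with
  | some (.mask off on) => (st.1, off, on)
  | some (.write addr value) => (writeA st.1 st.2.1 st.2.2 addr value, st.2.1, st.2.2)
  | none => st

def part2 (lines : List String) : Int :=
  ((lines.foldl stepA (PySem.Dict.empty, 0, 0)).1.values).sum

-- ===== PORT B =====

-- B's 'while b:' doubling loop. Python's loop terminates only for b ≥ 0 (b < 0, i.e. a
-- negative floating mask, diverges and is excluded by Pre_); the guard 0 < b makes the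
-- same computation total.
def expandB (addrs : List Int) (b : Int) : List Int :=
  if h : 0 < b then
    let rest := PySem.Int.band b (b - 1)
    let low := PySem.Int.bxor b rest
    expandB (addrs ++ addrs.map (fun a => PySem.Int.bxor a low)) rest
  else addrs
termination_by b.toNat
decreasing_by
  have h1 : PySem.Int.band b (b - 1) = ((b.toNat &&& (b - 1).toNat : Nat) : Int) :=
    PySem.Int.band_of_nonneg (by omega) (by omega)
  have h2 : b.toNat &&& (b - 1).toNat ≤ (b - 1).toNat := Nat.and_le_right
  omega

def stepB (st : PySem.Dict Int Int × Int × Int) (line : String) : PySem.Dict Int Int × Int × Int :=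
  if PySem.Str.startswith line "mask = " then
    (st.1, (PySem.Int.ofCharsBase? (PySem.Chars.replace (PySem.List.slice line.toList (some 7) none) "X".toList "0".toList) 2).getD 0,
           (PySem.Int.ofCharsBase? (PySem.Chars.replace (PySem.List.slice line.toList (some 7) none) "X".toList "1".toList) 2).getD 0)
  else if PySem.Str.startswith line "mem[" then
    ((expandB
        [PySem.Int.bor ((PySem.Int.ofChars? (PySem.List.slice line.toList (some 4) (some (PySem.Str.find line "] = ")))).getD 0) st.2.1]
        (PySem.Int.bxor st.2.1 st.2.2)).foldl
      (fun d a => d.insert a ((PySem.Int.ofChars? (PySem.List.slice line.toList (some (PySem.Str.find line "] = " + 4)) none)).getD 0)) st.1,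
     st.2.1, st.2.2)
  else st

def part2_alt (lines : List String) : Int :=
  ((lines.foldl stepB (PySem.Dict.empty, 0, 0)).1.values).sum

-- ===== PRECONDITION & SPEC =====

-- A line is admissible iff Python's parse of it returns normally (mask lines: both int(·,2)
-- parses succeed) and, for mask lines, the floating-bit mask off^on is nonnegative (a
-- negative one arises only from a sign in the mask field; there B's while-loop diverges).
def lineOK (line : String) : Bool :=
  if PySem.Str.startswith line "mask = " then
    match PySem.Int.ofCharsBase? (PySem.Chars.replace (PySem.List.slice line.toList (some 7) none) "X".toList "0".toList) 2,
          PySem.Int.ofCharsBase? (PySem.Chars.replace (PySem.List.slice line.toList (some 7) none) "X".toList "1".toList) 2 with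
    | some off, some on => decide (0 ≤ PySem.Int.bxor off on)
    | _, _ => false
  else if PySem.Str.startswith line "mem[" then
    decide (0 ≤ PySem.Str.find line "] = ") &&
      (PySem.Int.ofChars? (PySem.List.slice line.toList (some 4) (some (PySem.Str.find line "] = ")))).isSome &&
      (PySem.Int.ofChars? (PySem.List.slice line.toList (some (PySem.Str.find line "] = " + 4)) none)).isSome
  else true

-- no 'mem[…' line before the first 'mask = …' line (there A raises UnboundLocalError)
def masksFirst (lines : List String) (seen : Bool) : Bool :=
  match lines with
  | [] => true
  | l :: ls =>
    if PySem.Str.startswith l "mask = " then masksFirst ls true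
    else if PySem.Str.startswith l "mem[" && !seen then false
    else masksFirst ls seen

-- Pre_ excludes exactly the lines where Python's part2 raises (bad mask/mem syntax, a write
-- before any mask) and the mask lines with a signed (negative) floating mask, on which A's
-- enumeration over a negative bit mask returns while B's natural loop does not terminate.
def Pre_part2 (lines : List String) : Prop :=
  lines.all lineOK = true ∧ masksFirst lines false = true

instance (lines : List String) : Decidable (Pre_part2 lines) := by unfold Pre_part2; infer_instance

def pvWitness_part2 : List String :=
  ["mask = 000000000000000000000000000000X1001X", "mem[42] = 100", "mem[26] = 1"]

def Spec_part2 (lines : List String) (out : Int) : Prop := out = part2_alt lines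
instance (lines : List String) (out : Int) : Decidable (Spec_part2 lines out) := by unfold Spec_part2; infer_instance

-- ===== CLAIM (what is proved, stated in full; the proofs are below) =====
def Claim_equal_part2 : Prop :=
  ∀ (lines : List String), Dom_part2 lines → Pre_part2 lines → Spec_part2 lines (part2 lines)

-- ===== LEMMAS AND PROOFS =====

-- ---------- Nat bit-position layer ----------

/-- the exponents of the set bits of `n`, in increasing order -/
def posns (n : ℕ) : List ℕ :=
  if h : n = 0 then [] else
    (if n % 2 = 1 then [0] else []) ++ (posns (n / 2)).map (· + 1)
termination_by n
decreasing_by exact Nat.div_lt_self (Nat.pos_of_ne_zero h) one_lt_two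

/-- value of a list of bit positions -/
def valN (l : List ℕ) : ℕ := (l.map (2 ^ ·)).sum

theorem valN_nil : valN [] = 0 := rfl
theorem valN_cons (a : ℕ) (l : List ℕ) : valN (a :: l) = 2 ^ a + valN l := rfl
theorem valN_append (l₁ l₂ : List ℕ) : valN (l₁ ++ l₂) = valN l₁ + valN l₂ := by
  simp [valN]

theorem valN_map_succ (l : List ℕ) : valN (l.map (· + 1)) = 2 * valN l := by
  induction l with
  | nil => rfl
  | cons a l ih => simp [valN_cons, List.map_cons, ih, pow_succ]; ring

theorem valN_posns (n : ℕ) : valN (posns n) = n := by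
  induction n using Nat.strong_induction_on with
  | _ n ih =>
    rw [posns]
    split
    · rename_i h; simp [h, valN]
    · rename_i h
      rw [valN_append, valN_map_succ, ih (n / 2) (Nat.div_lt_self (Nat.pos_of_ne_zero h) one_lt_two)]
      rcases Nat.mod_two_eq_zero_or_one n with h2 | h2 <;> simp [h2, valN] <;> omega

theorem posns_pairwise (n : ℕ) : (posns n).Pairwise (· < ·) := by
  induction n using Nat.strong_induction_on with
  | _ n ih =>
    rw [posns]
    split
    · simp
    · rename_i h
      have hp := ih (n / 2) (Nat.div_lt_self (Nat.pos_of_ne_zero h) one_lt_two)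
      have hmap : ((posns (n / 2)).map (· + 1)).Pairwise (· < ·) := by
        exact List.Pairwise.map _ (fun a b hab => by omega) hp
      rcases Nat.mod_two_eq_zero_or_one n with h2 | h2
      · simp [h2, hmap]
      · rw [if_pos h2, List.singleton_append, List.pairwise_cons]
        refine ⟨fun b hb => ?_, hmap⟩
        simp only [List.mem_map] at hb
        omega

theorem length_posns (n : ℕ) : (posns n).length = PySem.Int.bitCount (n : Int) := by
  induction n using Nat.strong_induction_on with
  | _ n ih =>
    rw [posns]
    split
    · rename_i h; subst h; simp
    · rename_i h
      rw [PySem.Int.bitCount_natCast (Nat.pos_of_ne_zero h),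
        ← ih (n / 2) (Nat.div_lt_self (Nat.pos_of_ne_zero h) one_lt_two)]
      rcases Nat.mod_two_eq_zero_or_one n with h2 | h2 <;> simp [h2] <;> omega

theorem sum_range_two_pow (b : ℕ) : ∑ i ∈ Finset.range b, 2 ^ i = 2 ^ b - 1 := by
  induction b with
  | zero => simp
  | succ b ih =>
    rw [Finset.sum_range_succ, ih, pow_succ]
    have := Nat.one_le_two_pow (n := b)
    omega

theorem nodup_of_pairwise_lt {l : List ℕ} (h : l.Pairwise (· < ·)) : l.Nodup :=
  h.imp Nat.ne_of_lt

theorem valN_lt_pow {l : List ℕ} {b : ℕ} (h : l.Pairwise (· < ·)) (hb : ∀ x ∈ l, x < b) :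
    valN l < 2 ^ b := by
  have h1 : valN l = ∑ x ∈ l.toFinset, 2 ^ x := by
    rw [List.sum_toFinset _ (nodup_of_pairwise_lt h)]; rfl
  have h2 : l.toFinset ⊆ Finset.range b := by
    intro x hx
    simp only [List.mem_toFinset] at hx
    exact Finset.mem_range.mpr (hb x hx)
  have h3 : ∑ x ∈ l.toFinset, 2 ^ x ≤ ∑ i ∈ Finset.range b, 2 ^ i :=
    Finset.sum_le_sum_of_subset h2
  have := Nat.one_le_two_pow (n := b)
  rw [h1, sum_range_two_pow] at *
  omega

-- ---------- core bit identities ----------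

theorem dvd_valN_of_lt {b : ℕ} {l : List ℕ} (h : ∀ x ∈ l, b < x) : 2 ^ (b + 1) ∣ valN l := by
  apply List.dvd_sum
  intro x hx
  simp only [List.mem_map] at hx
  obtain ⟨a, ha, rfl⟩ := hx
  exact pow_dvd_pow 2 (h a ha)

theorem and_pred_eq (b r : ℕ) :
    (2 ^ (b + 1) * r + 2 ^ b) &&& (2 ^ (b + 1) * r + 2 ^ b - 1) = 2 ^ (b + 1) * r := by
  have hb1 : (1 : ℕ) ≤ 2 ^ b := Nat.one_le_two_pow
  have h2 : 2 ^ (b + 1) * r + 2 ^ b - 1 = 2 ^ (b + 1) * r + (2 ^ b - 1) := by omega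
  rw [h2]
  apply Nat.eq_of_testBit_eq
  intro j
  have hlt1 : 2 ^ b < 2 ^ (b + 1) := Nat.pow_lt_pow_right one_lt_two (by omega)
  rw [Nat.testBit_and, Nat.testBit_two_pow_mul_add _ (by omega) j,
    Nat.testBit_two_pow_mul_add _ (by omega) j]
  have hr : 2 ^ (b + 1) * r = 2 ^ (b + 1) * r + 0 := by omega
  rw [hr, Nat.testBit_two_pow_mul_add _ (by positivity) j]
  by_cases hj : j < b + 1
  · simp only [hj, if_pos]
    rw [Nat.testBit_two_pow, Nat.testBit_two_pow_sub_one]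
    rcases Nat.lt_or_ge j b with h | h
    · simp [Nat.ne_of_gt h, h, Nat.zero_testBit]
    · have : j = b := by omega
      simp [this, Nat.zero_testBit]
  · simp [hj]

theorem xor_pred_eq (b r : ℕ) :
    (2 ^ (b + 1) * r + 2 ^ b) ^^^ (2 ^ (b + 1) * r + 2 ^ b - 1) = 2 ^ (b + 1) - 1 := by
  have hb1 : (1 : ℕ) ≤ 2 ^ b := Nat.one_le_two_pow
  have h2 : 2 ^ (b + 1) * r + 2 ^ b - 1 = 2 ^ (b + 1) * r + (2 ^ b - 1) := by omega
  rw [h2]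
  apply Nat.eq_of_testBit_eq
  intro j
  have hlt1 : 2 ^ b < 2 ^ (b + 1) := Nat.pow_lt_pow_right one_lt_two (by omega)
  rw [Nat.testBit_xor, Nat.testBit_two_pow_mul_add _ (by omega) j,
    Nat.testBit_two_pow_mul_add _ (by omega) j, Nat.testBit_two_pow_sub_one]
  by_cases hj : j < b + 1
  · simp only [hj, if_pos]
    rw [Nat.testBit_two_pow, Nat.testBit_two_pow_sub_one]
    rcases Nat.lt_or_ge j b with h | h
    · simp [Nat.ne_of_gt h, h, hj]
    · have : j = b := by omega
      simp [this]
  · simp [hj]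

theorem add_eq_xor_of_lt {s : ℕ} (b r : ℕ) (hs : s < 2 ^ b) :
    2 ^ b * r + s = (2 ^ b * r) ^^^ s := by
  apply Nat.eq_of_testBit_eq
  intro j
  have h0 : 2 ^ b * r = 2 ^ b * r + 0 := by omega
  rw [Nat.testBit_xor, Nat.testBit_two_pow_mul_add _ hs j, h0,
    Nat.testBit_two_pow_mul_add _ (by positivity) j]
  by_cases hj : j < b
  · simp [hj, Nat.zero_testBit]
  · have hsj : s < 2 ^ j := lt_of_lt_of_le hs (Nat.pow_le_pow_right (by omega) (by omega))
    simp [hj, Nat.testBit_lt_two_pow hsj]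

-- K &&& (K-1) clears the lowest set bit: valN (b :: rest) version
theorem and_pred_valN {b : ℕ} {rest : List ℕ} (h : (b :: rest).Pairwise (· < ·)) :
    valN (b :: rest) &&& (valN (b :: rest) - 1) = valN rest := by
  obtain ⟨r, hr⟩ := dvd_valN_of_lt (fun x hx => (List.pairwise_cons.mp h).1 x hx)
  rw [valN_cons, hr, Nat.add_comm, and_pred_eq]

theorem xor_pred_valN {b : ℕ} {rest : List ℕ} (h : (b :: rest).Pairwise (· < ·)) :
    valN (b :: rest) ^^^ (valN (b :: rest) - 1) = 2 ^ (b + 1) - 1 := by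
  obtain ⟨r, hr⟩ := dvd_valN_of_lt (fun x hx => (List.pairwise_cons.mp h).1 x hx)
  rw [valN_cons, hr, Nat.add_comm, xor_pred_eq]

theorem valN_cons_eq_xor {b : ℕ} {rest : List ℕ} (h : (b :: rest).Pairwise (· < ·)) :
    valN (b :: rest) = 2 ^ b ^^^ valN rest := by
  obtain ⟨r, hr⟩ := dvd_valN_of_lt (fun x hx => (List.pairwise_cons.mp h).1 x hx)
  rw [valN_cons, hr, Nat.add_comm (2 ^ b), add_eq_xor_of_lt (b + 1) r
    (Nat.pow_lt_pow_right one_lt_two (by omega)), Nat.xor_comm]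

theorem valN_append_singleton_eq_xor {l : List ℕ} {b : ℕ} (h : (l ++ [b]).Pairwise (· < ·)) :
    valN (l ++ [b]) = valN l ^^^ 2 ^ b := by
  have hlt : ∀ x ∈ l, x < b := by
    have := List.pairwise_append.mp h
    intro x hx
    exact this.2.2 x hx b (by simp)
  have hv : valN l < 2 ^ b := valN_lt_pow ((List.pairwise_append.mp h).1) hlt
  rw [valN_append, valN_cons, valN_nil]
  have : valN l + (2 ^ b + 0) = 2 ^ b * 1 + valN l := by ring
  rw [this, add_eq_xor_of_lt b 1 hv, Nat.mul_one, Nat.xor_comm]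

-- D &&& (2^(b+1) - 1): the prefix of diff up to and including bit b
theorem and_mask_prefix {pre rest : List ℕ} {b : ℕ}
    (h : (pre ++ b :: rest).Pairwise (· < ·)) :
    valN (pre ++ b :: rest) &&& (2 ^ (b + 1) - 1) = valN (pre ++ [b]) := by
  have hsplit := List.pairwise_append.mp h
  have hrest : ∀ x ∈ rest, b < x := (List.pairwise_cons.mp hsplit.2.1).1
  have hpre : ∀ x ∈ pre, x < b := fun x hx => hsplit.2.2 x hx b (by simp)
  obtain ⟨r, hr⟩ := dvd_valN_of_lt hrest
  have hv : valN pre < 2 ^ b := valN_lt_pow hsplit.1 hpre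
  have hlt1 : 2 ^ b < 2 ^ (b + 1) := Nat.pow_lt_pow_right one_lt_two (by omega)
  rw [Nat.and_two_pow_sub_one_eq_mod, valN_append, valN_cons, hr, valN_append, valN_cons, valN_nil]
  rw [← Nat.add_assoc, Nat.add_mul_mod_self_left]
  have hsum : valN pre + 2 ^ b < 2 ^ (b + 1) := by rw [pow_succ]; omega
  rw [Nat.mod_eq_of_lt hsum]
  omega


-- ---------- Int lifting ----------

theorem bxor_negSucc_natCast (k m : ℕ) : PySem.Int.bxor (-↑k - 1) ↑m = -↑(k ^^^ m) - 1 := by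
  simp [PySem.Int.bxor]
  omega

theorem bxor_bxor_natCast (a : Int) (m n : ℕ) :
    PySem.Int.bxor (PySem.Int.bxor a ↑m) ↑n = PySem.Int.bxor a ↑(m ^^^ n) := by
  by_cases ha : 0 ≤ a
  · lift a to ℕ using ha
    simp [Nat.xor_assoc]
  · have h : a = -↑((-a - 1).toNat) - 1 := by omega
    rw [h, bxor_negSucc_natCast, bxor_negSucc_natCast, bxor_negSucc_natCast, Nat.xor_assoc]

theorem natCast_shiftRight' (m j : ℕ) : ((m : Int) >>> j) = ((m >>> j : ℕ) : Int) := by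
  simp [Int.shiftRight_eq_div_pow, Nat.shiftRight_eq_div_pow]

theorem one_shiftLeft_eq (p : ℕ) : (1 : Int) <<< p = ((2 ^ p : ℕ) : Int) := by
  simp [Int.shiftLeft_eq]

-- ---------- A's reduce, characterised ----------

/-- the exclusive-or of the selected mask prefixes accumulated by A's reduce -/
def spreadA (m : ℕ) (pre : List ℕ) : List ℕ → ℕ
  | [] => 0
  | b :: rest => (if m % 2 = 1 then valN (pre ++ [b]) else 0) ^^^ spreadA (m / 2) (pre ++ [b]) rest

theorem foldA_spec (rest : List ℕ) : ∀ (pre : List ℕ) (x : Int) (j0 m : ℕ),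
    (pre ++ rest).Pairwise (· < ·) →
    (PySem.List.pyRange ↑j0 (↑j0 + ↑rest.length)).foldl (fA ↑(valN (pre ++ rest)) ↑m) (x, ↑(valN rest))
      = (PySem.Int.bxor x ↑(spreadA (m >>> j0) pre rest), ((valN [] : ℕ) : Int)) := by
  induction rest with
  | nil =>
    intro pre x j0 m hpw
    have h0 : PySem.List.pyRange ↑j0 (↑j0 + ↑(List.length ([] : List ℕ))) = [] := by
      simp [PySem.List.pyRange]
    rw [h0]
    simp [spreadA]
  | cons b rest' ih =>
    intro pre x j0 m hpw
    have hlt : (↑j0 : Int) < ↑j0 + ↑(List.length (b :: rest')) := by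
      simp only [List.length_cons]; push_cast; omega
    rw [PySem.List.pyRange_one_cons hlt, List.foldl_cons]
    have hpair : (b :: rest').Pairwise (· < ·) := (List.pairwise_append.mp hpw).2.1
    have hK1 : 1 ≤ valN (b :: rest') := by
      rw [valN_cons]; have := Nat.one_le_two_pow (n := b); omega
    have hc1 : ((valN (b :: rest') : Int) - 1) = ((valN (b :: rest') - 1 : ℕ) : Int) := by omega
    have hk' : PySem.Int.band ↑(valN (b :: rest')) (↑(valN (b :: rest')) - 1) = ↑(valN rest') := by
      rw [hc1, PySem.Int.band_natCast, and_pred_valN hpair]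
    have hbit : PySem.Int.band ((↑m : Int) >>> j0) 1 = ↑((m >>> j0) % 2) := by
      rw [natCast_shiftRight']
      rw [show (1 : Int) = ((1 : ℕ) : Int) from rfl, PySem.Int.band_natCast, Nat.and_one_is_mod]
    have hassoc : (pre ++ [b]) ++ rest' = pre ++ b :: rest' := by simp
    have hpw' : ((pre ++ [b]) ++ rest').Pairwise (· < ·) := by rw [hassoc]; exact hpw
    have hrng : PySem.List.pyRange (↑j0 + 1) (↑j0 + ↑(List.length (b :: rest')))
        = PySem.List.pyRange ↑(j0 + 1) (↑(j0 + 1) + ↑rest'.length) := by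
      have e1 : ((↑j0 : Int) + 1) = ↑(j0 + 1) := by push_cast; ring
      have e2 : ((↑j0 : Int) + ↑(List.length (b :: rest'))) = ↑(j0 + 1) + ↑rest'.length := by
        simp only [List.length_cons]; push_cast; ring
      rw [e1, e2]
    have hshift : m >>> j0 / 2 = m >>> (j0 + 1) := (Nat.shiftRight_succ m j0).symm
    rcases Nat.mod_two_eq_zero_or_one (m >>> j0) with hm | hm
    · have hstep : fA ↑(valN (pre ++ b :: rest')) ↑m (x, ↑(valN (b :: rest'))) ↑j0
          = (x, ↑(valN rest')) := by
        simp only [fA, Int.toNat_natCast]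
        rw [hbit, hm, Nat.cast_zero, sub_zero, PySem.Int.bxor_self, PySem.Int.band_zero,
          PySem.Int.bxor_zero, hk']
      rw [hstep, hrng, ← hassoc]
      rw [ih (pre ++ [b]) x (j0 + 1) m hpw']
      simp [spreadA, hm, hshift]
    · have htog : PySem.Int.band ↑(valN (pre ++ b :: rest'))
          (PySem.Int.bxor ↑(valN (b :: rest')) (↑(valN (b :: rest')) - 1))
          = ↑(valN (pre ++ [b])) := by
        rw [hc1, PySem.Int.bxor_natCast, xor_pred_valN hpair, PySem.Int.band_natCast,
          and_mask_prefix hpw]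
      have hstep : fA ↑(valN (pre ++ b :: rest')) ↑m (x, ↑(valN (b :: rest'))) ↑j0
          = (PySem.Int.bxor x ↑(valN (pre ++ [b])), ↑(valN rest')) := by
        simp only [fA, Int.toNat_natCast]
        rw [hbit, hm, Nat.cast_one, htog, hk']
      rw [hstep, hrng, ← hassoc]
      rw [ih (pre ++ [b]) (PySem.Int.bxor x ↑(valN (pre ++ [b]))) (j0 + 1) m hpw']
      rw [bxor_bxor_natCast]
      simp [spreadA, hm, hshift]


-- ---------- subset values of the floating bits ----------

theorem spreadA_append_last (l : List ℕ) : ∀ (pre : List ℕ) (m b : ℕ),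
    spreadA m pre (l ++ [b])
      = spreadA m pre l ^^^ (if (m >>> l.length) % 2 = 1 then valN (pre ++ l ++ [b]) else 0) := by
  induction l with
  | nil =>
    intro pre m b
    simp [spreadA]
  | cons a l ih =>
    intro pre m b
    have hsh : (m / 2) >>> l.length = m >>> (l.length + 1) := by
      rw [Nat.add_comm, Nat.shiftRight_add, Nat.shiftRight_one]
    simp only [List.cons_append, spreadA, ih (pre ++ [a]) (m / 2) b, List.length_cons, hsh,
      List.append_assoc, List.cons_append, List.nil_append]
    rw [Nat.xor_assoc]

theorem spreadA_congr (l : List ℕ) : ∀ (pre : List ℕ) (m m' : ℕ),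
    m % 2 ^ l.length = m' % 2 ^ l.length → spreadA m pre l = spreadA m' pre l := by
  induction l with
  | nil => intro pre m m' _; simp [spreadA]
  | cons b l ih =>
    intro pre m m' h
    have hpow : (2 : ℕ) ^ (b :: l).length = 2 * 2 ^ l.length := by
      simp [List.length_cons, pow_succ]; ring
    rw [hpow] at h
    have h2 : m % 2 = m' % 2 := by
      have e1 := Nat.mod_mod_of_dvd m (Dvd.intro (2 ^ l.length) rfl : (2:ℕ) ∣ 2 * 2 ^ l.length)
      have e2 := Nat.mod_mod_of_dvd m' (Dvd.intro (2 ^ l.length) rfl : (2:ℕ) ∣ 2 * 2 ^ l.length)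
      rw [← e1, ← e2, h]
    have hd : (m / 2) % 2 ^ l.length = (m' / 2) % 2 ^ l.length := by
      rw [← Nat.mod_mul_right_div_self m 2 (2 ^ l.length), ← Nat.mod_mul_right_div_self m' 2 (2 ^ l.length), h]
    simp only [spreadA, h2, ih (pre ++ [b]) (m / 2) (m' / 2) hd]

theorem toFinset_map_eq_image (l : List ℕ) (f : ℕ → ℕ) :
    (l.map f).toFinset = l.toFinset.image f := by
  ext x; simp

def subsetsL : List ℕ → List ℕ
  | [] => [0]
  | a :: l => subsetsL l ++ (subsetsL l).map (fun s => 2 ^ a ^^^ s)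

theorem valN_mem_subsetsL {l : List ℕ} (h : l.Pairwise (· < ·)) : valN l ∈ subsetsL l := by
  induction l with
  | nil => simp [subsetsL, valN_nil]
  | cons a l ih =>
    rw [valN_cons_eq_xor h]
    simp only [subsetsL, List.mem_append, List.mem_map]
    exact Or.inr ⟨valN l, ih (List.pairwise_cons.mp h).2, rfl⟩

theorem closure_subsetsL (l : List ℕ) : ∀ t ∈ subsetsL l,
    Finset.image (· ^^^ t) (subsetsL l).toFinset = (subsetsL l).toFinset := by
  induction l with
  | nil =>
    intro t ht
    simp only [subsetsL, List.mem_singleton] at ht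
    subst ht
    simp [subsetsL]
  | cons a l ih =>
    intro t ht
    have hdecomp : (subsetsL (a :: l)).toFinset
        = (subsetsL l).toFinset ∪ (subsetsL l).toFinset.image (fun s => 2 ^ a ^^^ s) := by
      simp [subsetsL, toFinset_map_eq_image]
    rw [hdecomp, Finset.image_union]
    simp only [subsetsL, List.mem_append, List.mem_map] at ht
    rcases ht with ht | ⟨s, hs, rfl⟩
    · have h1 : Finset.image (· ^^^ t) (subsetsL l).toFinset = (subsetsL l).toFinset := ih t ht
      have h2 : Finset.image (· ^^^ t) ((subsetsL l).toFinset.image (fun s => 2 ^ a ^^^ s))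
          = (subsetsL l).toFinset.image (fun s => 2 ^ a ^^^ s) := by
        rw [Finset.image_image]
        have : ((· ^^^ t) ∘ fun s => 2 ^ a ^^^ s) = (fun s => 2 ^ a ^^^ s) ∘ (· ^^^ t) := by
          funext x
          simp [Function.comp, Nat.xor_assoc]
        rw [this, ← Finset.image_image, h1]
      rw [h1, h2]
    · have hone : Finset.image (· ^^^ (2 ^ a ^^^ s)) (subsetsL l).toFinset
          = (subsetsL l).toFinset.image (fun s' => 2 ^ a ^^^ s') := by
        have : (fun x => x ^^^ (2 ^ a ^^^ s)) = (fun s' => 2 ^ a ^^^ s') ∘ (· ^^^ s) := by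
          funext x
          simp only [Function.comp]
          rw [Nat.xor_comm (2 ^ a) s, ← Nat.xor_assoc, Nat.xor_comm (x ^^^ s) (2 ^ a)]
        rw [this, ← Finset.image_image, ih s hs]
      have htwo : Finset.image (· ^^^ (2 ^ a ^^^ s)) ((subsetsL l).toFinset.image (fun s' => 2 ^ a ^^^ s'))
          = (subsetsL l).toFinset := by
        rw [Finset.image_image]
        have : ((· ^^^ (2 ^ a ^^^ s)) ∘ fun s' => 2 ^ a ^^^ s') = (· ^^^ s) := by
          funext x
          simp only [Function.comp]
          simp [Nat.xor_comm, Nat.xor_left_comm]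
        rw [this, ih s hs]
      rw [hone, htwo, Finset.union_comm]

theorem subsetsL_append_last (l : List ℕ) (b : ℕ) :
    (subsetsL (l ++ [b])).toFinset
      = (subsetsL l).toFinset ∪ (subsetsL l).toFinset.image (fun s => 2 ^ b ^^^ s) := by
  induction l with
  | nil => simp [subsetsL]
  | cons a l ih =>
    have hcomm : ∀ (S : Finset ℕ),
        (S.image (fun s => 2 ^ b ^^^ s)).image (fun s => 2 ^ a ^^^ s)
          = (S.image (fun s => 2 ^ a ^^^ s)).image (fun s => 2 ^ b ^^^ s) := by
      intro S
      rw [Finset.image_image, Finset.image_image]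
      congr 1
      funext x
      simp only [Function.comp]
      rw [← Nat.xor_assoc, Nat.xor_comm (2 ^ a) (2 ^ b), Nat.xor_assoc]
    simp only [List.cons_append, subsetsL, List.toFinset_append, toFinset_map_eq_image, ih,
      Finset.image_union, hcomm]
    ext x
    simp only [Finset.mem_union]
    tauto

theorem range_two_pow_succ (k : ℕ) :
    Finset.range (2 ^ (k + 1))
      = Finset.range (2 ^ k) ∪ (Finset.range (2 ^ k)).image (· + 2 ^ k) := by
  have h2 : (2 : ℕ) ^ (k + 1) = 2 ^ k + 2 ^ k := by rw [pow_succ]; omega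
  ext x
  simp only [Finset.mem_range, Finset.mem_union, Finset.mem_image, h2]
  constructor
  · intro hx
    rcases Nat.lt_or_ge x (2 ^ k) with h | h
    · exact Or.inl h
    · exact Or.inr ⟨x - 2 ^ k, by omega, by omega⟩
  · rintro (h | ⟨y, hy, rfl⟩) <;> omega

theorem main_set (bs : List ℕ) (h : bs.Pairwise (· < ·)) :
    (Finset.range (2 ^ bs.length)).image (fun m => spreadA m [] bs) = (subsetsL bs).toFinset := by
  induction bs using List.reverseRecOn with
  | nil => simp [spreadA, subsetsL]
  | append_singleton l b ih =>
    have hl : l.Pairwise (· < ·) := (List.pairwise_append.mp h).1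
    have hS := ih hl
    rw [List.length_append, List.length_singleton, range_two_pow_succ, Finset.image_union]
    have hlow : (Finset.range (2 ^ l.length)).image (fun m => spreadA m [] (l ++ [b]))
        = (subsetsL l).toFinset := by
      rw [← hS]
      apply Finset.image_congr
      intro m hm
      simp only [Finset.coe_range, Set.mem_Iio] at hm
      show spreadA m [] (l ++ [b]) = spreadA m [] l
      rw [spreadA_append_last]
      have hz : m >>> l.length = 0 := by
        rw [Nat.shiftRight_eq_div_pow]
        exact Nat.div_eq_of_lt hm
      simp [hz]
    have hhigh : ((Finset.range (2 ^ l.length)).image (· + 2 ^ l.length)).image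
          (fun m => spreadA m [] (l ++ [b]))
        = (subsetsL l).toFinset.image (fun s => 2 ^ b ^^^ s) := by
      rw [Finset.image_image]
      have heq : ∀ m ∈ Finset.range (2 ^ l.length),
          ((fun m => spreadA m [] (l ++ [b])) ∘ (· + 2 ^ l.length)) m
            = (fun s => valN (l ++ [b]) ^^^ s) (spreadA m [] l) := by
        intro m hm
        simp only [Finset.mem_range] at hm
        simp only [Function.comp]
        rw [spreadA_append_last]
        have hone : (m + 2 ^ l.length) >>> l.length = 1 := by
          rw [Nat.shiftRight_eq_div_pow, Nat.add_div_right _ (Nat.pos_of_ne_zero (by positivity)),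
            Nat.div_eq_of_lt hm]
        have hmod : spreadA (m + 2 ^ l.length) [] l = spreadA m [] l := by
          apply spreadA_congr
          exact Nat.add_mod_right m (2 ^ l.length) ▸ rfl
        rw [hone, hmod]
        simp [Nat.xor_comm]
      rw [Finset.image_congr heq]
      rw [show (fun m => (fun s => valN (l ++ [b]) ^^^ s) (spreadA m [] l))
            = (fun s => valN (l ++ [b]) ^^^ s) ∘ (fun m => spreadA m [] l) from rfl,
        ← Finset.image_image, hS]
      have hV : valN (l ++ [b]) = valN l ^^^ 2 ^ b := valN_append_singleton_eq_xor h
      have hsplit : (fun s => valN (l ++ [b]) ^^^ s)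
          = (fun s => 2 ^ b ^^^ s) ∘ (· ^^^ valN l) := by
        funext x
        simp only [Function.comp, hV]
        rw [Nat.xor_comm (valN l) (2 ^ b), Nat.xor_assoc, Nat.xor_comm (valN l) x]
      rw [hsplit, ← Finset.image_image, closure_subsetsL l (valN l) (valN_mem_subsetsL hl)]
    rw [hlow, hhigh, ← subsetsL_append_last]


-- ---------- B's doubling loop, characterised ----------

def expandNat (addrs : List Int) : List ℕ → List Int
  | [] => addrs
  | c :: rest => expandNat (addrs ++ addrs.map (fun a => PySem.Int.bxor a ↑(2 ^ c))) rest

theorem expandB_eq (l : List ℕ) : ∀ addrs : List Int, l.Pairwise (· < ·) →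
    expandB addrs ↑(valN l) = expandNat addrs l := by
  induction l with
  | nil =>
    intro addrs _
    rw [expandB]
    simp [valN_nil, expandNat]
  | cons b rest ih =>
    intro addrs h
    have hK1 : 1 ≤ valN (b :: rest) := by
      rw [valN_cons]; have := Nat.one_le_two_pow (n := b); omega
    rw [expandB]
    rw [dif_pos (by exact_mod_cast hK1 : (0 : Int) < ↑(valN (b :: rest)))]
    have hc1 : ((valN (b :: rest) : Int) - 1) = ((valN (b :: rest) - 1 : ℕ) : Int) := by omega
    have hk' : PySem.Int.band ↑(valN (b :: rest)) (↑(valN (b :: rest)) - 1) = ↑(valN rest) := by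
      rw [hc1, PySem.Int.band_natCast, and_pred_valN h]
    have hlow : PySem.Int.bxor ↑(valN (b :: rest)) ↑(valN rest) = ((2 ^ b : ℕ) : Int) := by
      rw [PySem.Int.bxor_natCast]
      rw [valN_cons_eq_xor h]
      simp
    simp only [hk', hlow]
    rw [ih _ (List.pairwise_cons.mp h).2]
    rfl

theorem toFinset_map_eq_image' {α β : Type} [DecidableEq α] [DecidableEq β]
    (l : List α) (f : α → β) : (l.map f).toFinset = l.toFinset.image f := by
  ext x; simp

theorem expandNat_toFinset (l : List ℕ) : ∀ addrs : List Int,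
    (expandNat addrs l).toFinset
      = Finset.image₂ (fun (a : Int) (s : ℕ) => PySem.Int.bxor a ↑s)
          addrs.toFinset (subsetsL l).toFinset := by
  induction l with
  | nil =>
    intro addrs
    have : (subsetsL []).toFinset = {0} := by simp [subsetsL]
    rw [expandNat, this, Finset.image₂_singleton_right]
    simp
  | cons c rest ih =>
    intro addrs
    rw [expandNat, ih]
    have haddr : (addrs ++ addrs.map (fun a => PySem.Int.bxor a ↑(2 ^ c))).toFinset
        = addrs.toFinset ∪ addrs.toFinset.image (fun a => PySem.Int.bxor a ↑(2 ^ c)) := by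
      rw [List.toFinset_append, toFinset_map_eq_image']
    have hsub : (subsetsL (c :: rest)).toFinset
        = (subsetsL rest).toFinset ∪ (subsetsL rest).toFinset.image (fun s => 2 ^ c ^^^ s) := by
      simp [subsetsL, toFinset_map_eq_image]
    rw [haddr, hsub, Finset.image₂_union_left, Finset.image₂_union_right,
      Finset.image₂_image_left, Finset.image₂_image_right]
    congr 1
    apply Finset.image₂_congr
    intro a _ s _
    exact bxor_bxor_natCast a (2 ^ c) s

-- ---------- dict layer ----------

def insertKeys (d : PySem.Dict Int Int) (ks : List Int) (v : Int) : PySem.Dict Int Int :=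
  ks.foldl (fun d k => d.insert k v) d

theorem get?_insertKeys (v : Int) : ∀ (ks : List Int) (d : PySem.Dict Int Int) (k : Int),
    (insertKeys d ks v).get? k = if k ∈ ks then some v else d.get? k := by
  intro ks
  induction ks with
  | nil => intro d k; simp [insertKeys]
  | cons a ks ih =>
    intro d k
    show (insertKeys (d.insert a v) ks v).get? k = _
    rw [ih]
    by_cases hks : k ∈ ks
    · simp [hks, List.mem_cons]
    · rw [PySem.Dict.get?_insert]
      by_cases hka : k = a <;> simp [hks, hka, List.mem_cons]

theorem mem_keys_insertKeys (v : Int) : ∀ (ks : List Int) (d : PySem.Dict Int Int) (k : Int),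
    (k ∈ (insertKeys d ks v).keys ↔ k ∈ d.keys ∨ k ∈ ks) := by
  intro ks
  induction ks with
  | nil => intro d k; simp [insertKeys]
  | cons a ks ih =>
    intro d k
    show k ∈ (insertKeys (d.insert a v) ks v).keys ↔ _
    rw [ih]
    simp [PySem.Dict.mem_keys_insert, List.mem_cons]
    tauto

theorem nodup_keys_insertKeys (v : Int) (ks : List Int) (d : PySem.Dict Int Int)
    (h : d.keys.Nodup) : (insertKeys d ks v).keys.Nodup :=
  PySem.Dict.nodup_keys_foldl_insert ks (fun _ _ => v) d h

/-- the two memories agree: unique keys, same key set, same lookups -/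
def MemRel (d1 d2 : PySem.Dict Int Int) : Prop :=
  d1.keys.Nodup ∧ d2.keys.Nodup ∧ (∀ k, (k ∈ d1.keys ↔ k ∈ d2.keys)) ∧
    ∀ k, d1.get? k = d2.get? k

theorem sum_values_eq {d1 d2 : PySem.Dict Int Int} (h : MemRel d1 d2) :
    d1.values.sum = d2.values.sum := by
  obtain ⟨h1, h2, hk, hg⟩ := h
  rw [PySem.Dict.values_eq_map_keys d1 h1 0, PySem.Dict.values_eq_map_keys d2 h2 0]
  rw [← List.sum_toFinset _ h1, ← List.sum_toFinset _ h2]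
  have hfin : d1.keys.toFinset = d2.keys.toFinset := by
    ext k; simp [List.mem_toFinset, hk k]
  rw [hfin]
  apply Finset.sum_congr rfl
  intro k _
  rw [PySem.Dict.getD_eq_get?_getD, PySem.Dict.getD_eq_get?_getD, hg k]

theorem rel_insertKeys {d1 d2 : PySem.Dict Int Int} (h : MemRel d1 d2) (v : Int)
    {ks1 ks2 : List Int} (hks : ks1.toFinset = ks2.toFinset) :
    MemRel (insertKeys d1 ks1 v) (insertKeys d2 ks2 v) := by
  obtain ⟨h1, h2, hk, hg⟩ := h
  have hmem : ∀ k : Int, k ∈ ks1 ↔ k ∈ ks2 := by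
    intro k
    rw [← List.mem_toFinset, ← List.mem_toFinset (l := ks2), hks]
  refine ⟨nodup_keys_insertKeys v ks1 d1 h1, nodup_keys_insertKeys v ks2 d2 h2, ?_, ?_⟩
  · intro k
    rw [mem_keys_insertKeys, mem_keys_insertKeys, hk k, hmem k]
  · intro k
    rw [get?_insertKeys, get?_insertKeys]
    by_cases hm : k ∈ ks1
    · rw [if_pos hm, if_pos ((hmem k).mp hm)]
    · rw [if_neg hm, if_neg (fun hc => hm ((hmem k).mpr hc)), hg k]

-- ---------- the per-write key sets coincide ----------


-- ---------- per-write equality ----------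

def aKeys (off on addr : Int) : List Int :=
  (List.range (2 ^ (posns (PySem.Int.bxor off on).toNat).length)).map
    (fun m => PySem.Int.bxor (PySem.Int.bor addr off)
      ↑(spreadA m [] (posns (PySem.Int.bxor off on).toNat)))

theorem writeA_keys (mem : PySem.Dict Int Int) (off on addr v : Int)
    (h : 0 ≤ PySem.Int.bxor off on) :
    writeA mem off on addr v = insertKeys mem (aKeys off on addr) v := by
  have hcast : PySem.Int.bxor off on = ((PySem.Int.bxor off on).toNat : Int) := by omega
  set n := (PySem.Int.bxor off on).toNat with hn
  set bs := posns n with hbs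
  have hpw : bs.Pairwise (· < ·) := posns_pairwise n
  have hval : valN bs = n := valN_posns n
  have haux : ∀ m : ℕ,
      ((PySem.List.pyRange 0 ↑(PySem.Int.bitCount (PySem.Int.bxor off on))).foldl
        (fA (PySem.Int.bxor off on) ↑m) (PySem.Int.bor addr off, PySem.Int.bxor off on)).1
        = PySem.Int.bxor (PySem.Int.bor addr off) ↑(spreadA m [] bs) := by
    intro m
    have hlen : PySem.Int.bitCount (PySem.Int.bxor off on) = bs.length := by
      rw [hcast, hbs, length_posns n]
    have hfold := foldA_spec bs [] (PySem.Int.bor addr off) 0 m (by simpa using hpw)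
    simp only [List.nil_append, hval] at hfold
    have hrange : PySem.List.pyRange 0 ↑(PySem.Int.bitCount (PySem.Int.bxor off on))
        = PySem.List.pyRange ↑(0 : ℕ) (↑(0 : ℕ) + ↑bs.length) := by
      rw [hlen]; norm_num
    rw [hrange, hcast, hfold]
    simp
  have hlen : PySem.Int.bitCount (PySem.Int.bxor off on) = bs.length := by
    rw [hcast, hbs, length_posns n]
  unfold writeA aKeys
  simp only [← hn, ← hbs]
  rw [show PySem.List.pyRange 0 ((1 : Int) <<< PySem.Int.bitCount (PySem.Int.bxor off on))
        = List.map (fun k : ℕ => (k : Int)) (List.range (2 ^ bs.length)) from by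
      rw [hlen, one_shiftLeft_eq, PySem.List.pyRange_zero_natCast]]
  rw [List.foldl_map]
  unfold insertKeys
  rw [List.foldl_map]
  simp only [haux]

theorem keys_toFinset_eq (off on addr : Int) (h : 0 ≤ PySem.Int.bxor off on) :
    (aKeys off on addr).toFinset
      = (expandB [PySem.Int.bor addr off] (PySem.Int.bxor off on)).toFinset := by
  have hcast : PySem.Int.bxor off on = ((PySem.Int.bxor off on).toNat : Int) := by omega
  set n := (PySem.Int.bxor off on).toNat with hn
  set bs := posns n with hbs
  have hpw : bs.Pairwise (· < ·) := posns_pairwise n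
  have hval : valN bs = n := valN_posns n
  have hB : expandB [PySem.Int.bor addr off] (PySem.Int.bxor off on)
      = expandNat [PySem.Int.bor addr off] bs := by
    rw [hcast, ← hval, expandB_eq bs _ hpw]
  rw [hB, expandNat_toFinset]
  have hsingle : ([PySem.Int.bor addr off] : List Int).toFinset = {PySem.Int.bor addr off} := by
    simp
  rw [hsingle, Finset.image₂_singleton_left]
  unfold aKeys
  rw [← hn, ← hbs, toFinset_map_eq_image', List.toFinset_range]
  rw [show (fun m => PySem.Int.bxor (PySem.Int.bor addr off) ↑(spreadA m [] bs))
        = (fun s : ℕ => PySem.Int.bxor (PySem.Int.bor addr off) ↑s) ∘ (fun m => spreadA m [] bs)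
      from rfl, ← Finset.image_image, main_set bs hpw]

theorem rel_write {d1 d2 : PySem.Dict Int Int} (h : MemRel d1 d2) (off on addr v : Int)
    (hnn : 0 ≤ PySem.Int.bxor off on) :
    MemRel (writeA d1 off on addr v)
      (insertKeys d2 (expandB [PySem.Int.bor addr off] (PySem.Int.bxor off on)) v) := by
  rw [writeA_keys d1 off on addr v hnn]
  exact rel_insertKeys h v (keys_toFinset_eq off on addr hnn)

-- ---------- the line loop ----------

theorem step_rel (line : String) (hok : lineOK line = true) {d1 d2 : PySem.Dict Int Int}
    (off on : Int) (h : MemRel d1 d2) (hnn : 0 ≤ PySem.Int.bxor off on) :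
    MemRel (stepA (d1, off, on) line).1 (stepB (d2, off, on) line).1 ∧
      (stepA (d1, off, on) line).2 = (stepB (d2, off, on) line).2 ∧
      0 ≤ PySem.Int.bxor (stepA (d1, off, on) line).2.1 (stepA (d1, off, on) line).2.2 := by
  by_cases h1 : PySem.Str.startswith line "mask = "
  · rcases ho0 : PySem.Int.ofCharsBase?
        (PySem.Chars.replace (PySem.List.slice line.toList (some 7) none) "X".toList "0".toList) 2
      with _ | o0
    · rw [lineOK, if_pos h1, ho0] at hok
      simp at hok
    · rcases ho1 : PySem.Int.ofCharsBase?
          (PySem.Chars.replace (PySem.List.slice line.toList (some 7) none) "X".toList "1".toList) 2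
        with _ | o1
      · rw [lineOK, if_pos h1, ho0, ho1] at hok
        simp at hok
      · rw [lineOK, if_pos h1, ho0, ho1] at hok
        simp only [decide_eq_true_eq] at hok
        simp only [stepA, stepB, parseA, if_pos h1, ho0, ho1, Option.getD_some]
        exact ⟨h, trivial, hok⟩
  · by_cases h2 : PySem.Str.startswith line "mem["
    · simp only [stepA, stepB, parseA, if_neg h1, if_pos h2]
      exact ⟨rel_write h off on _ _ hnn, trivial, hnn⟩
    · simp only [stepA, stepB, parseA, if_neg h1, if_neg h2]
      exact ⟨h, trivial, hnn⟩

theorem run_rel (lines : List String) : ∀ (d1 d2 : PySem.Dict Int Int) (off on : Int),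
    lines.all lineOK = true → MemRel d1 d2 → 0 ≤ PySem.Int.bxor off on →
    MemRel ((lines.foldl stepA (d1, off, on)).1) ((lines.foldl stepB (d2, off, on)).1) := by
  induction lines with
  | nil => intro d1 d2 off on _ h _; exact h
  | cons l ls ih =>
    intro d1 d2 off on hall h hnn
    rw [List.all_cons, Bool.and_eq_true] at hall
    obtain ⟨hrel, heq, hnn'⟩ := step_rel l hall.1 off on h hnn
    rw [List.foldl_cons, List.foldl_cons]
    have e1 : stepA (d1, off, on) l
        = ((stepA (d1, off, on) l).1, (stepA (d1, off, on) l).2.1, (stepA (d1, off, on) l).2.2) :=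
      rfl
    have e2 : stepB (d2, off, on) l
        = ((stepB (d2, off, on) l).1, (stepA (d1, off, on) l).2.1, (stepA (d1, off, on) l).2.2) := by
      rw [heq]
    rw [e1, e2]
    exact ih _ _ _ _ hall.2 hrel hnn'

-- ===== VERDICT (by name: the statement is the Claim_ definition above) =====
theorem part2_spec : Claim_equal_part2 := by
  intro lines _ hpre
  unfold Spec_part2 part2 part2_alt
  apply sum_values_eq
  refine run_rel lines PySem.Dict.empty PySem.Dict.empty 0 0 hpre.1 ?_ (by decide)
  refine ⟨PySem.Dict.nodup_keys_empty, PySem.Dict.nodup_keys_empty, ?_, fun k => rfl⟩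
  intro k
  exact Iff.rfl
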